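-- pv_equiv track=rewrite | github.com/FORTH-ICS-INSPIRE/artemis | utils/artemis_utils/__init__.py | __clean_loops
-- ===== SOURCE A (Python) =====
-- from typing import List
--
-- def __clean_loops(seq: List[int]) -> List[int]:
--     """
--     Method to remove loops from AS path.
--     """
--     # use inverse direction to clean loops in the path of the traffic
--     seq_inv = seq[::-1]
--     new_seq_inv = []
--     for x in seq_inv:
--         if x not in new_seq_inv:
--             new_seq_inv.append(x)
--         else:
--             x_index = new_seq_inv.index(x)
--             new_seq_inv = new_seq_inv[: x_index + 1]
--     return new_seq_inv[::-1]
-- ===== SOURCE B (Python) =====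
-- def __clean_loops(seq):
--     # Two-phase jump scan: precompute each value's last index in the reversed
--     # path, then walk it by jumping past every loop; output is append-only
--     # (no membership tests, no truncation).
--     rev = seq[::-1]
--     last = {}
--     for j, x in enumerate(rev):
--         last[x] = j
--     out = []
--     j = 0
--     n = len(rev)
--     while j < n:
--         x = rev[j]
--         out.append(x)
--         j = last[x] + 1
--     return out[::-1]
-- ===== Notes on version B (the rewrite author's own statement) =====
-- stated objective: faster
-- what changed: Replaces A's stack-with-truncation scan (per-element membership test and list.index over the growing result) by a two-phase algorithm: one pass builds a value-to-last-index table of the reversed path, then a jump scan walks the reversed path skipping each loop in O(1), appending output elements without ever truncating.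
import Mathlib
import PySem

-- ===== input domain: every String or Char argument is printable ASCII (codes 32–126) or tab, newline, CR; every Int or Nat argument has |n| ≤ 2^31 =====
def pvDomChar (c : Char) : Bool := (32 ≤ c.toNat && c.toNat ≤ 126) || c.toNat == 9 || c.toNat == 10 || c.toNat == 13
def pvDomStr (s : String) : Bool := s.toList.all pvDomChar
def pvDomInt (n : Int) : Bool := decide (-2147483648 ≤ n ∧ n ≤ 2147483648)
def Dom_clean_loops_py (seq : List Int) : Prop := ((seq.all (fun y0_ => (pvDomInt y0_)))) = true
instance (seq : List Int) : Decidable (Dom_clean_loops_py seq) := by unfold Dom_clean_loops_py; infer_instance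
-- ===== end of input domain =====

-- B replaces A's stack-with-truncation scan by a two-phase algorithm: build a
-- value→last-index table of the reversed path, then jump-scan it, appending
-- output without ever truncating (objective: faster, asymptotic).

-- ===== PORT A =====
-- the for-loop of __clean_loops over the reversed sequence, state = new_seq_inv
def cleanA_loop : List Int → List Int → List Int
  | acc, [] => acc
  | acc, x :: rest =>
    if x ∉ acc then
      cleanA_loop (acc ++ [x]) rest
    else
      match PySem.List.index? acc x with
      | some i => cleanA_loop (PySem.List.slice acc none (some ((i : Int) + 1))) rest
      | none => acc  -- unreachable: .index raises only when x ∉ acc, but the branch has x ∈ acc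

def clean_loops_py (seq : List Int) : List Int :=
  -- seq[::-1] is List.reverse
  (cleanA_loop [] seq.reverse).reverse

-- ===== PORT B =====
-- phase 1 of Source B: last = {}; for j, x in enumerate(rev): last[x] = j
def buildLast (rev : List Int) : PySem.Dict Int Int :=
  (PySem.List.enumerate rev).foldl (fun d p => d.insert p.2 p.1) PySem.Dict.empty

-- phase 2 of Source B: while j < n: x = rev[j]; out.append(x); j = last[x] + 1
-- (fuel only makes the recursion total; the proof shows rev.length steps suffice)
def jumpB (rev : List Int) (last : PySem.Dict Int Int) : Nat → Int → List Int
  | 0, _ => []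
  | fuel + 1, j =>
    if j < (rev.length : Int) then
      match PySem.List.pyGet? rev j with
      | some x =>
        match last.get? x with
        | some p => x :: jumpB rev last fuel (p + 1)
        | none => []  -- Python last[x] would raise KeyError; unreachable: every rev[j] was inserted
      | none => []    -- unreachable: 0 ≤ j < n
    else []

def clean_loops_py_alt (seq : List Int) : List Int :=
  (jumpB seq.reverse (buildLast seq.reverse) seq.reverse.length 0).reverse

-- ===== PRECONDITION & SPEC =====
def Spec_clean_loops_py (seq : List Int) (out : List Int) : Prop := out = clean_loops_py_alt seq
instance (seq : List Int) (out : List Int) : Decidable (Spec_clean_loops_py seq out) := by unfold Spec_clean_loops_py; infer_instance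

-- ===== CLAIM (what is proved, stated in full; the proofs are below) =====
def Claim_equal_clean_loops_py : Prop := ∀ (seq : List Int), Dom_clean_loops_py seq → Spec_clean_loops_py seq (clean_loops_py seq)

-- ===== LEMMAS AND PROOFS =====

-- the common recursive characterization: keep the head, skip past its last occurrence
def suffixAfterLast (x : Int) (l : List Int) : List Int :=
  (l.reverse.takeWhile (fun y => y != x)).reverse

lemma suffixAfterLast_length_le (x : Int) (l : List Int) :
    (suffixAfterLast x l).length ≤ l.length := by
  unfold suffixAfterLast
  simpa using ((List.takeWhile_sublist (l := l.reverse) (fun y => y != x)).length_le).trans (by simp)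

def cleanSpec : List Int → List Int
  | [] => []
  | x :: rest => x :: cleanSpec (suffixAfterLast x rest)
termination_by l => l.length
decreasing_by simpa using Nat.lt_succ_of_le (suffixAfterLast_length_le x rest)

lemma not_mem_suffixAfterLast (x : Int) (l : List Int) : x ∉ suffixAfterLast x l := by
  unfold suffixAfterLast
  intro h
  have := List.mem_takeWhile_imp (List.mem_reverse.mp h)
  simp at this

-- decomposition at the last occurrence
lemma suffixAfterLast_decomp {x : Int} {l : List Int} (h : x ∈ l) :
    ∃ u, l = u ++ x :: suffixAfterLast x l := by
  have hx : x ∈ l.reverse := List.mem_reverse.mpr h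
  have hd : l.reverse.dropWhile (fun y => y != x) ≠ [] := by
    intro hnil
    have hsplit := List.takeWhile_append_dropWhile (p := fun y => y != x) (l := l.reverse)
    rw [hnil, List.append_nil] at hsplit
    have := List.mem_takeWhile_imp (hsplit ▸ hx)
    simp at this
  have hhead : (l.reverse.dropWhile (fun y => y != x)).head hd = x := by
    have := List.head_dropWhile_not (p := fun y => y != x) (l := l.reverse) hd
    simpa using this
  have hcons : l.reverse.dropWhile (fun y => y != x) =
      x :: (l.reverse.dropWhile (fun y => y != x)).tail := by
    have hc := (List.cons_head_tail hd).symm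
    rw [hhead] at hc
    exact hc
  have hsplit : l.reverse = l.reverse.takeWhile (fun y => y != x) ++
      (x :: (l.reverse.dropWhile (fun y => y != x)).tail) := by
    conv_lhs => rw [← List.takeWhile_append_dropWhile (p := fun y => y != x) (l := l.reverse)]
    rw [← hcons]
  refine ⟨((l.reverse.dropWhile (fun y => y != x)).tail).reverse, List.reverse_injective ?_⟩
  conv_lhs => rw [hsplit]
  simp [suffixAfterLast]

lemma suffixAfterLast_append (x : Int) (u v : List Int) (hv : x ∉ v) :
    suffixAfterLast x (u ++ x :: v) = v := by
  unfold suffixAfterLast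
  rw [show (u ++ x :: v).reverse = v.reverse ++ x :: u.reverse by simp]
  rw [List.takeWhile_append]
  have h1 : v.reverse.takeWhile (fun y => y != x) = v.reverse :=
    List.takeWhile_eq_self_iff.mpr (by intro a ha; simp; intro h; exact hv (h ▸ List.mem_reverse.mp ha))
  rw [h1]
  simp

lemma suffixAfterLast_of_not_mem (x : Int) (l : List Int) (h : x ∉ l) :
    suffixAfterLast x l = l := by
  unfold suffixAfterLast
  rw [List.takeWhile_eq_self_iff.mpr (by intro a ha; simp; intro he; exact h (he ▸ List.mem_reverse.mp ha))]
  simp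

-- ---------- A side ----------

lemma index?_of_mem (l : List Int) (v : Int) (h : v ∈ l) :
    PySem.List.index? l v = some (l.idxOf v) := by
  obtain ⟨k, hk⟩ := Option.isSome_iff_exists.mp ((PySem.List.index?_isSome_iff l v).mpr h)
  rw [hk, List.idxOf_eq_getD_idxOf? v l, ← PySem.List.index?_eq_idxOf?, hk]
  rfl

lemma cleanA_stepDup {y : Int} {S : List Int} (rest : List Int) (h : y ∈ S) :
    cleanA_loop S (y :: rest) = cleanA_loop (S.take (S.idxOf y + 1)) rest := by
  rw [cleanA_loop, if_neg (by simpa using h), index?_of_mem S y h]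
  have hslice : PySem.List.slice S none (some ((S.idxOf y : Int) + 1)) = S.take (S.idxOf y + 1) := by
    rw [PySem.List.slice_to S (b := (S.idxOf y : Int) + 1) (by positivity)]
    norm_num
  simp [hslice]

lemma cleanA_stepNew {y : Int} {S : List Int} (rest : List Int) (h : y ∉ S) :
    cleanA_loop S (y :: rest) = cleanA_loop (S ++ [y]) rest := by
  rw [cleanA_loop, if_pos (by simpa using h)]

-- processing with a fresh head x at the bottom of the stack just carries x through
lemma cleanA_cons_out : ∀ (rest S : List Int) (x : Int), x ∉ rest → x ∉ S →
    cleanA_loop (x :: S) rest = x :: cleanA_loop S rest := by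
  intro rest
  induction rest with
  | nil => intro S x _ _; simp [cleanA_loop]
  | cons y rest ih =>
    intro S x hxr hxS
    have hyx : y ≠ x := fun h => hxr (h ▸ List.mem_cons_self)
    have hxr' : x ∉ rest := fun h => hxr (List.mem_cons_of_mem _ h)
    by_cases hyS : y ∈ S
    · rw [cleanA_stepDup rest (List.mem_cons_of_mem _ hyS),
        cleanA_stepDup rest hyS, List.idxOf_cons_ne _ (Ne.symm hyx), List.take_succ_cons,
        ih _ _ hxr' (fun h => hxS (List.mem_of_mem_take h))]
    · rw [cleanA_stepNew rest (by simp [hyS]; exact hyx), cleanA_stepNew rest hyS,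
        List.cons_append, ih _ _ hxr' (by simp [hxS]; exact Ne.symm hyx)]

-- hitting x again truncates the stack to [x], whatever was pushed in between
lemma cleanA_through_last : ∀ (u S : List Int) (x : Int) (v : List Int),
    cleanA_loop (x :: S) (u ++ x :: v) = cleanA_loop [x] v := by
  intro u
  induction u with
  | nil =>
    intro S x v
    rw [List.nil_append, cleanA_stepDup v (List.mem_cons_self), List.idxOf_cons_self]
    simp
  | cons y u ih =>
    intro S x v
    by_cases hy : y ∈ x :: S
    · rw [List.cons_append, cleanA_stepDup (u ++ x :: v) hy]
      rcases eq_or_ne y x with h | h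
      · subst h; rw [List.idxOf_cons_self]; simpa using ih [] y v
      · rw [List.idxOf_cons_ne _ (Ne.symm h), List.take_succ_cons]; exact ih _ x v
    · rw [List.cons_append, cleanA_stepNew (u ++ x :: v) hy, List.cons_append]
      exact ih _ x v

lemma cleanA_eq_cleanSpec : ∀ (R : List Int), cleanA_loop [] R = cleanSpec R := by
  intro R
  induction hn : R.length using Nat.strong_induction_on generalizing R with
  | _ n ih =>
  match R with
  | [] => simp [cleanA_loop, cleanSpec]
  | x :: rest =>
    rw [cleanA_stepNew rest (List.not_mem_nil), List.nil_append, cleanSpec]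
    by_cases hx : x ∈ rest
    · obtain ⟨u, hu⟩ := suffixAfterLast_decomp hx
      conv_lhs => rw [hu]
      rw [cleanA_through_last u [] x _,
        cleanA_cons_out _ [] x (not_mem_suffixAfterLast x rest) (List.not_mem_nil)]
      congr 1
      exact ih _ (by subst hn; exact Nat.lt_succ_of_le (suffixAfterLast_length_le x rest)) _ rfl
    · rw [cleanA_cons_out rest [] x hx (List.not_mem_nil),
        suffixAfterLast_of_not_mem x rest hx]
      congr 1
      exact ih _ (by subst hn; simp) _ rfl

-- ---------- B side ----------

-- the last-occurrence index stored by phase 1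
def lastIdx (R : List Int) (x : Int) : Nat :=
  R.length - 1 - (R.reverse.takeWhile (fun y => y != x)).length

lemma lastIdx_append_self (init : List Int) (y : Int) :
    lastIdx (init ++ [y]) y = init.length := by
  unfold lastIdx
  rw [List.reverse_append]
  simp

lemma lastIdx_append_ne (init : List Int) (y x : Int) (hne : x ≠ y) :
    lastIdx (init ++ [y]) x = lastIdx init x := by
  unfold lastIdx
  have h2 : ((init ++ [y]).reverse.takeWhile (fun z => z != x)) =
      y :: init.reverse.takeWhile (fun z => z != x) := by
    rw [List.reverse_append]
    simp [Ne.symm hne]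
  rw [h2]
  have ht : (init.reverse.takeWhile (fun z => z != x)).length ≤ init.length :=
    ((List.takeWhile_sublist (l := init.reverse) (fun z => z != x)).length_le).trans (by simp)
  simp
  omega

lemma buildLast_get? : ∀ (R : List Int) (x : Int), x ∈ R →
    (buildLast R).get? x = some ((lastIdx R x : Int)) := by
  intro R
  induction R using List.reverseRecOn with
  | nil => intro x hx; simp at hx

  | append_singleton init y ih =>
    intro x hx
    have hb : buildLast (init ++ [y]) = (buildLast init).insert y ((init.length : Int)) := by
      unfold buildLast
      rw [PySem.List.enumerate_append, List.foldl_append]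
      simp [PySem.List.enumerate_cons, PySem.List.enumerate_nil]
    rw [hb, PySem.Dict.get?_insert]
    by_cases hxy : x = y
    · subst hxy
      rw [if_pos rfl, lastIdx_append_self]
    · have hxi : x ∈ init := by
        rcases List.mem_append.mp hx with h | h
        · exact h
        · simp at h; exact absurd h hxy
      rw [if_neg hxy, ih x hxi, lastIdx_append_ne init y x hxy]

-- R[j] = x locates j at or before the last occurrence, and dropping past the
-- last occurrence is suffixAfterLast of the tail after j
lemma lastIdx_key {R : List Int} {x : Int} {j : Nat} (hj : R[j]? = some x) :
    j ≤ lastIdx R x ∧ lastIdx R x < R.length ∧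
      suffixAfterLast x (R.drop (j + 1)) = R.drop (lastIdx R x + 1) := by
  have hjlt : j < R.length := by
    by_contra hge
    rw [List.getElem?_eq_none (by omega)] at hj
    exact absurd hj (by simp)
  have hmem : x ∈ R := by
    rw [List.getElem?_eq_getElem hjlt] at hj
    exact (Option.some_injective _ hj) ▸ R.getElem_mem hjlt
  obtain ⟨u, hu⟩ := suffixAfterLast_decomp hmem
  set v := suffixAfterLast x R with hv
  have hxv : x ∉ v := not_mem_suffixAfterLast x R
  have hlen : R.length = u.length + 1 + v.length := by
    rw [hu]; simp; omega
  have hidx : lastIdx R x = u.length := by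
    unfold lastIdx
    have htw : (R.reverse.takeWhile (fun y => y != x)).length = v.length := by
      rw [hv]; unfold suffixAfterLast; simp
    rw [htw]; omega
  have hjle : j ≤ u.length := by
    by_contra hgt
    push Not at hgt
    have hget : R[j]? = v[j - u.length - 1]? := by
      rw [hu, List.getElem?_append_right (by omega)]
      have he : j - u.length = (j - u.length - 1) + 1 := by omega
      rw [he, List.getElem?_cons_succ]
      congr 1
    rw [hget] at hj
    exact hxv (List.mem_of_getElem? hj)
  have hdropP : R.drop (lastIdx R x + 1) = v := by
    rw [hidx, hu, show u ++ x :: v = (u ++ [x]) ++ v by simp,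
      show u.length + 1 = (u ++ [x]).length by simp, List.drop_left]
  refine ⟨hidx ▸ hjle, by omega, ?_⟩
  rw [hdropP]
  rcases Nat.lt_or_ge j u.length with hlt | hge
  · have hd : R.drop (j + 1) = u.drop (j + 1) ++ x :: v := by
      rw [hu, List.drop_append_of_le_length (by omega)]
    rw [hd]
    exact suffixAfterLast_append x _ _ hxv
  · have hje : j = u.length := le_antisymm hjle hge
    have hd : R.drop (j + 1) = v := by
      rw [hje, hu, show u ++ x :: v = (u ++ [x]) ++ v by simp,
        show u.length + 1 = (u ++ [x]).length by simp, List.drop_left]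
    rw [hd]
    exact suffixAfterLast_of_not_mem x _ hxv

lemma jumpB_eq_cleanSpec : ∀ (fuel : Nat) (R : List Int) (j : Nat),
    R.length - j ≤ fuel →
    jumpB R (buildLast R) fuel ((j : Nat) : Int) = cleanSpec (R.drop j) := by
  intro fuel
  induction fuel with
  | zero =>
    intro R j hfuel
    have : R.drop j = [] := List.drop_eq_nil_of_le (by omega)
    simp [jumpB, this, cleanSpec]
  | succ fuel ih =>
    intro R j hfuel
    by_cases hjlt : j < R.length
    · have hget : R[j]? = some R[j] := List.getElem?_eq_getElem hjlt
      obtain ⟨hle, hltn, hsal⟩ := lastIdx_key hget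
      rw [jumpB, if_pos (by exact_mod_cast hjlt)]
      simp only [PySem.List.pyGet?_natCast, hget, buildLast_get? R R[j] (R.getElem_mem hjlt)]
      have hcast : ((lastIdx R R[j] : Nat) : Int) + 1 = (((lastIdx R R[j] + 1 : Nat)) : Int) := by
        push_cast; ring
      rw [hcast, ih R (lastIdx R R[j] + 1) (by omega)]
      rw [List.drop_eq_getElem_cons hjlt, cleanSpec, hsal]
    · have hnil : R.drop j = [] := List.drop_eq_nil_of_le (by omega)
      rw [jumpB, if_neg (by push Not; exact_mod_cast Nat.le_of_not_lt hjlt), hnil, cleanSpec]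

-- ===== VERDICT (by name: the statement is the Claim_ definition above) =====
theorem clean_loops_py_spec : Claim_equal_clean_loops_py := by
  intro seq _
  unfold Spec_clean_loops_py clean_loops_py clean_loops_py_alt
  rw [cleanA_eq_cleanSpec,
    show ((0 : Int) = ((0 : Nat) : Int)) from rfl,
    jumpB_eq_cleanSpec seq.reverse.length seq.reverse 0 (by simp)]
  simp
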